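-- pv_equiv track=rewrite | github.com/YesselmanLab/python_tutorials | lesson7.py | sort_student_score
-- ===== SOURCE A (Python) =====
-- def sort_student_score(name_list, score_list):
--     """Method that takes a list of names and scores and returns a dict with keys as letter grades and a list of names as as values"""
--     score_dict = {}
--     for grade in "A B C D F".split():
--         score_dict[grade] = []
--
--     for name, score in zip(name_list, score_list):
--         if score >= 90:
--             score_dict["A"].append(name)
--         elif score >= 80:
--             score_dict["B"].append(name)
--         elif score >= 70:
--             score_dict["C"].append(name)
--         elif score >= 60:
--             score_dict["D"].append(name)
--         else:
--             score_dict["F"].append(name)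
--     return score_dict
-- ===== SOURCE B (Python) =====
-- def sort_student_score(name_list, score_list):
--     """Method that takes a list of names and scores and returns a dict with keys as letter grades and a list of names as as values"""
--     pairs = list(zip(name_list, score_list))
--     return {
--         "A": [n for n, s in pairs if s >= 90],
--         "B": [n for n, s in pairs if 80 <= s < 90],
--         "C": [n for n, s in pairs if 70 <= s < 80],
--         "D": [n for n, s in pairs if 60 <= s < 70],
--         "F": [n for n, s in pairs if s < 60],
--     }
-- ===== Notes on version B (the rewrite author's own statement) =====
-- stated objective: idiomatic
-- what changed: Replaces the mutable dict plus per-item if/elif cascade with a dict literal of five independent range-filter comprehensions over the zipped pairs (per-bucket passes instead of one mutating pass).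
import Mathlib
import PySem

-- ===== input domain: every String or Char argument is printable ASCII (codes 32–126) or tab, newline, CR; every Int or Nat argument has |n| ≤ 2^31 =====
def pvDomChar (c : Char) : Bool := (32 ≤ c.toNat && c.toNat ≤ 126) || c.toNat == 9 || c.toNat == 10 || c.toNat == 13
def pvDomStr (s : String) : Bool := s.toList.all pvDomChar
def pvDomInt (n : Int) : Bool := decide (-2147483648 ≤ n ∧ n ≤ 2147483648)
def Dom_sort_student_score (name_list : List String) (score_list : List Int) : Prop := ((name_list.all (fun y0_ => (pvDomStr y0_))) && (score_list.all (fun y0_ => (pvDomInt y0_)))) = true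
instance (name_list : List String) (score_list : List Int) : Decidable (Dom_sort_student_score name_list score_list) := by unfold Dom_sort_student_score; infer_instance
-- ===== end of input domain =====

-- B replaces A's mutable dict + if/elif cascade with five independent range-filter
-- comprehensions over the zipped pairs (idiomatic; same O(n) cost).


-- ===== PORT A =====
-- literal port of A: build score_dict with the five grade keys, then one pass
-- over zip(name_list, score_list) appending via the if/elif cascade; return the dict.
def sort_student_score (name_list : List String) (score_list : List Int) : List (String × List String) :=
  let d0 : PySem.Dict String (List String) :=
    (PySem.Str.split₀ "A B C D F").foldl (fun d grade => d.insert grade []) PySem.Dict.empty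
  let d :=
    (name_list.zip score_list).foldl (fun d p =>
      if p.2 ≥ 90 then d.modify "A" [] (· ++ [p.1])
      else if p.2 ≥ 80 then d.modify "B" [] (· ++ [p.1])
      else if p.2 ≥ 70 then d.modify "C" [] (· ++ [p.1])
      else if p.2 ≥ 60 then d.modify "D" [] (· ++ [p.1])
      else d.modify "F" [] (· ++ [p.1])) d0
  d.items

-- ===== PORT B =====
-- port of Source B: zip once, then a dict literal of five range-filter comprehensions.
def sort_student_score_alt (name_list : List String) (score_list : List Int) : List (String × List String) :=
  let pairs := name_list.zip score_list
  [("A", ((pairs.filter (fun p => 90 ≤ p.2)).map (·.1))),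
   ("B", ((pairs.filter (fun p => 80 ≤ p.2 && p.2 < 90)).map (·.1))),
   ("C", ((pairs.filter (fun p => 70 ≤ p.2 && p.2 < 80)).map (·.1))),
   ("D", ((pairs.filter (fun p => 60 ≤ p.2 && p.2 < 70)).map (·.1))),
   ("F", ((pairs.filter (fun p => p.2 < 60)).map (·.1)))]

-- ===== PRECONDITION & SPEC =====
def Spec_sort_student_score (name_list : List String) (score_list : List Int) (out : List (String × List String)) : Prop := out = sort_student_score_alt name_list score_list
instance (name_list : List String) (score_list : List Int) (out : List (String × List String)) : Decidable (Spec_sort_student_score name_list score_list out) := by unfold Spec_sort_student_score; infer_instance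

-- ===== CLAIM (what is proved, stated in full; the proofs are below) =====
def Claim_equal_sort_student_score : Prop := ∀ (name_list : List String) (score_list : List Int), Dom_sort_student_score name_list score_list → Spec_sort_student_score name_list score_list (sort_student_score name_list score_list)

-- ===== LEMMAS AND PROOFS =====

-- dict facts specific to the five-bucket dict of A's loop (each is definitional).
theorem pvModA (a b c dd f : List String) (n : String) :
    (PySem.Dict.mk [("A",a),("B",b),("C",c),("D",dd),("F",f)]).modify "A" [] (· ++ [n]) =
    PySem.Dict.mk [("A",a ++ [n]),("B",b),("C",c),("D",dd),("F",f)] := rfl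
theorem pvModB (a b c dd f : List String) (n : String) :
    (PySem.Dict.mk [("A",a),("B",b),("C",c),("D",dd),("F",f)]).modify "B" [] (· ++ [n]) =
    PySem.Dict.mk [("A",a),("B",b ++ [n]),("C",c),("D",dd),("F",f)] := rfl
theorem pvModC (a b c dd f : List String) (n : String) :
    (PySem.Dict.mk [("A",a),("B",b),("C",c),("D",dd),("F",f)]).modify "C" [] (· ++ [n]) =
    PySem.Dict.mk [("A",a),("B",b),("C",c ++ [n]),("D",dd),("F",f)] := rfl
theorem pvModD (a b c dd f : List String) (n : String) :
    (PySem.Dict.mk [("A",a),("B",b),("C",c),("D",dd),("F",f)]).modify "D" [] (· ++ [n]) =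
    PySem.Dict.mk [("A",a),("B",b),("C",c),("D",dd ++ [n]),("F",f)] := rfl
theorem pvModF (a b c dd f : List String) (n : String) :
    (PySem.Dict.mk [("A",a),("B",b),("C",c),("D",dd),("F",f)]).modify "F" [] (· ++ [n]) =
    PySem.Dict.mk [("A",a),("B",b),("C",c),("D",dd),("F",f ++ [n])] := rfl

-- invariant of A's bucketing loop: starting from the five-bucket dict with
-- accumulated contents a b c dd f, the loop appends exactly B's range filters.
theorem pvLoop_invariant (ps : List (String × Int)) (a b c dd f : List String) :
    ((ps.foldl (fun d p =>
      if p.2 ≥ 90 then d.modify "A" [] (· ++ [p.1])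
      else if p.2 ≥ 80 then d.modify "B" [] (· ++ [p.1])
      else if p.2 ≥ 70 then d.modify "C" [] (· ++ [p.1])
      else if p.2 ≥ 60 then d.modify "D" [] (· ++ [p.1])
      else d.modify "F" [] (· ++ [p.1]))
      (PySem.Dict.mk [("A",a),("B",b),("C",c),("D",dd),("F",f)])).items) =
    [("A", a ++ (ps.filter (fun p => 90 ≤ p.2)).map (·.1)),
     ("B", b ++ (ps.filter (fun p => 80 ≤ p.2 && p.2 < 90)).map (·.1)),
     ("C", c ++ (ps.filter (fun p => 70 ≤ p.2 && p.2 < 80)).map (·.1)),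
     ("D", dd ++ (ps.filter (fun p => 60 ≤ p.2 && p.2 < 70)).map (·.1)),
     ("F", f ++ (ps.filter (fun p => p.2 < 60)).map (·.1))] := by
  induction ps generalizing a b c dd f with
  | nil => simp
  | cons hd tl ih =>
    obtain ⟨n, s⟩ := hd
    simp only [List.foldl_cons, List.filter_cons, ge_iff_le, Bool.and_eq_true, decide_eq_true_eq]
    by_cases h90 : 90 ≤ s
    · rw [if_pos h90, pvModA, ih,
        if_pos h90, if_neg (by omega : ¬ (80 ≤ s ∧ s < 90)),
        if_neg (by omega : ¬ (70 ≤ s ∧ s < 80)), if_neg (by omega : ¬ (60 ≤ s ∧ s < 70)),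
        if_neg (by omega : ¬ s < 60)]
      simp
    · by_cases h80 : 80 ≤ s
      · rw [if_neg h90, if_pos h80, pvModB, ih,
          if_neg h90, if_pos (by omega : 80 ≤ s ∧ s < 90),
          if_neg (by omega : ¬ (70 ≤ s ∧ s < 80)), if_neg (by omega : ¬ (60 ≤ s ∧ s < 70)),
          if_neg (by omega : ¬ s < 60)]
        simp
      · by_cases h70 : 70 ≤ s
        · rw [if_neg h90, if_neg h80, if_pos h70, pvModC, ih,
            if_neg h90, if_neg (by omega : ¬ (80 ≤ s ∧ s < 90)),
            if_pos (by omega : 70 ≤ s ∧ s < 80), if_neg (by omega : ¬ (60 ≤ s ∧ s < 70)),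
            if_neg (by omega : ¬ s < 60)]
          simp
        · by_cases h60 : 60 ≤ s
          · rw [if_neg h90, if_neg h80, if_neg h70, if_pos h60, pvModD, ih,
              if_neg h90, if_neg (by omega : ¬ (80 ≤ s ∧ s < 90)),
              if_neg (by omega : ¬ (70 ≤ s ∧ s < 80)), if_pos (by omega : 60 ≤ s ∧ s < 70),
              if_neg (by omega : ¬ s < 60)]
            simp
          · rw [if_neg h90, if_neg h80, if_neg h70, if_neg h60, pvModF, ih,
              if_neg h90, if_neg (by omega : ¬ (80 ≤ s ∧ s < 90)),
              if_neg (by omega : ¬ (70 ≤ s ∧ s < 80)), if_neg (by omega : ¬ (60 ≤ s ∧ s < 70)),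
              if_pos (by omega : s < 60)]
            simp

-- ===== VERDICT (by name: the statement is the Claim_ definition above) =====
theorem sort_student_score_spec : Claim_equal_sort_student_score := by
  intro name_list score_list _
  show sort_student_score name_list score_list = sort_student_score_alt name_list score_list
  unfold sort_student_score sort_student_score_alt
  have h0 : (PySem.Str.split₀ "A B C D F").foldl
      (fun (d : PySem.Dict String (List String)) grade => d.insert grade []) PySem.Dict.empty =
      PySem.Dict.mk [("A",[]),("B",[]),("C",[]),("D",[]),("F",[])] := by decide
  simp only [h0, pvLoop_invariant, List.nil_append]
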